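-- pv_equiv track=rewrite | github.com/bigtreeljc/leetcode_acm | solutions.py | isBuild
-- ===== SOURCE A (Python) =====
-- def isBuild(x):
--     # write you code here
--     dp = [False for i in range(x + 1)]
--     if x < 3 or (x > 3 and x < 7):
--         return "NO"
--     if x == 3 or x == 6:
--         return "YES"
--     dp[3] = True
--     dp[6] = True
--     dp[7] = True
--
--     for i in range(8, x + 1):
--         dp[i] = dp[i - 3] or dp[i - 7]
--
--     return "YES" if dp[x] else "NO"
-- ===== SOURCE B (Python) =====
-- def isBuild(x):
--     # O(1) closed form: the numerical semigroup generated by 3 and 7 contains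
--     # every integer >= 3 except 4, 5, 8 and 11 (Frobenius number 11).
--     return "YES" if x >= 3 and x not in (4, 5, 8, 11) else "NO"
-- ===== Notes on version B (the rewrite author's own statement) =====
-- stated objective: faster
-- what changed: Replaced the O(x) dynamic-programming table over range(x+1) by an O(1) closed-form membership test in the numerical semigroup generated by 3 and 7 (every n >= 3 except 4, 5, 8, 11).
-- intended difference: On x = 6 only: A's early guard 'x > 3 and x < 7' returns "NO" before its own 'x == 6' check can fire, but 6 = 3 + 3 is buildable, so B's "YES" is the intended value. — e.g. on isBuild(6): A returns "NO", B returns "YES"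
import Mathlib
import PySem

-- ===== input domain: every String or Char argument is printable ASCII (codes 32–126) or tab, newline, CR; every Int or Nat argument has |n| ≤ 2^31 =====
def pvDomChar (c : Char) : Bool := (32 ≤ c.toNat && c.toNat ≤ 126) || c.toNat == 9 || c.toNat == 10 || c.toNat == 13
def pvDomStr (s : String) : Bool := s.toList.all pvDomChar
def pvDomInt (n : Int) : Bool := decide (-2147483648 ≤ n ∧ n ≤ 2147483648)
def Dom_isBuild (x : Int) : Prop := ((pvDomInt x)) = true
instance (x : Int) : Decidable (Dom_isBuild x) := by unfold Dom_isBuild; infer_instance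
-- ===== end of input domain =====

-- B replaces A's O(x) DP table by an O(1) closed-form test (semigroup generated by 3 and 7);
-- A wrongly returns "NO" at x = 6, stated as the intended difference D_isBuild below.

-- ===== PORT A =====
def isBuild (x : Int) : String :=
  -- dp = [False for i in range(x + 1)]  (dp is held as an Array for O(1) index assignment;
  -- every index used below is nonnegative and in range, so setIfInBounds/getD are exactly
  -- Python's dp[i] = v / dp[i] there)
  let dp : Array Bool := ((PySem.List.pyRange 0 (x + 1) 1).map (fun _ => false)).toArray
  if x < 3 ∨ (x > 3 ∧ x < 7) then "NO"
  else if x = 3 ∨ x = 6 then "YES"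
  else
    let dp := ((dp.setIfInBounds 3 true).setIfInBounds 6 true).setIfInBounds 7 true
    let dp := (PySem.List.pyRange 8 (x + 1) 1).foldl
      (fun d i => d.setIfInBounds i.toNat
        (d.getD (i - 3).toNat false || d.getD (i - 7).toNat false)) dp
    if dp.getD x.toNat false then "YES" else "NO"

-- ===== PORT B =====
def isBuild_alt (x : Int) : String :=
  if 3 ≤ x ∧ x ≠ 4 ∧ x ≠ 5 ∧ x ≠ 8 ∧ x ≠ 11 then "YES" else "NO"

-- ===== PRECONDITION & SPEC =====
-- On x = 6 only: A's early guard 'x > 3 and x < 7' returns "NO" before its own 'x == 6'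
-- check can fire, but 6 = 3 + 3 is buildable, so B's "YES" is the intended value.
def D_isBuild (x : Int) : Prop := x = 6
instance (x : Int) : Decidable (D_isBuild x) := by unfold D_isBuild; infer_instance
def Spec_isBuild (x : Int) (out : String) : Prop := ¬ D_isBuild x → out = isBuild_alt x
instance (x : Int) (out : String) : Decidable (Spec_isBuild x out) := by unfold Spec_isBuild; infer_instance
def pvDiffWitness_isBuild : Int := (6)
def pvDiffWitnessOut_isBuild : String × String := ("NO", "YES")

-- ===== CLAIM (what is proved, stated in full; the proofs are below) =====
def Claim_unchanged_isBuild : Prop := ∀ (x : Int), Dom_isBuild x → Spec_isBuild x (isBuild x)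
def Claim_changed_isBuild : Prop := Dom_isBuild (pvDiffWitness_isBuild) ∧ D_isBuild (pvDiffWitness_isBuild) ∧ isBuild (pvDiffWitness_isBuild) = pvDiffWitnessOut_isBuild.1 ∧ isBuild_alt (pvDiffWitness_isBuild) = pvDiffWitnessOut_isBuild.2 ∧ pvDiffWitnessOut_isBuild.1 ≠ pvDiffWitnessOut_isBuild.2
def Claim_exact_isBuild : Prop := ∀ (x : Int), Dom_isBuild x → D_isBuild x → isBuild x ≠ isBuild_alt x

-- ===== LEMMAS AND PROOFS =====

-- the closed-form membership test, as a Bool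
def pvRep (j : Int) : Bool := decide (3 ≤ j ∧ j ≠ 4 ∧ j ≠ 5 ∧ j ≠ 8 ∧ j ≠ 11)

lemma pvRep_rec (b : Int) (h : 8 ≤ b) : (pvRep (b - 3) || pvRep (b - 7)) = pvRep b := by
  by_cases h2 : b ≤ 18
  · interval_cases b <;> decide
  · have h3 : pvRep b = true := decide_eq_true (by omega)
    have h4 : pvRep (b - 3) = true := decide_eq_true (by omega)
    rw [h3, h4]; rfl

lemma pvGetD_set (d : Array Bool) (i : Nat) (v : Bool) (j : Nat) (hi : i < d.size) :
    (d.setIfInBounds i v).getD j false = if j = i then v else d.getD j false := by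
  rw [Array.getD_eq_getD_getElem?, Array.getD_eq_getD_getElem?, Array.getElem?_setIfInBounds]
  by_cases hje : j = i
  · rw [if_pos hje, if_pos (by omega), if_pos (by omega)]; rfl
  · rw [if_neg hje, if_neg (fun h => hje h.symm)]

lemma pv_inv (x : Int) (hx : 7 ≤ x) (k : Nat) (hk : 8 + (k : Int) ≤ x + 1) :
    (((PySem.List.pyRange 8 (8 + (k : Int)) 1).foldl
      (fun d i => d.setIfInBounds i.toNat
        (d.getD (i - 3).toNat false || d.getD (i - 7).toNat false))
      ((((((PySem.List.pyRange 0 (x + 1) 1).map (fun _ => false)).toArray).setIfInBounds 3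
        true).setIfInBounds 6 true).setIfInBounds 7 true)).size = (x + 1).toNat)
    ∧ ∀ j : Nat, (j : Int) < 8 + (k : Int) →
      ((PySem.List.pyRange 8 (8 + (k : Int)) 1).foldl
        (fun d i => d.setIfInBounds i.toNat
          (d.getD (i - 3).toNat false || d.getD (i - 7).toNat false))
        ((((((PySem.List.pyRange 0 (x + 1) 1).map (fun _ => false)).toArray).setIfInBounds 3
          true).setIfInBounds 6 true).setIfInBounds 7 true)).getD j false = pvRep (j : Int) := by
  have hbsize : (((PySem.List.pyRange 0 (x + 1) 1).map (fun _ => (false : Bool))).toArray).size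
      = (x + 1).toNat := by
    rw [List.size_toArray, List.length_map, PySem.List.length_pyRange_one]; omega
  have hbase : ∀ j : Nat,
      (((PySem.List.pyRange 0 (x + 1) 1).map (fun _ => (false : Bool))).toArray).getD j false
        = false := by
    intro j
    rw [Array.getD_eq_getD_getElem?, List.getElem?_toArray]
    cases h : (PySem.List.pyRange 0 (x + 1) 1)[j]? <;> simp
  have hbase2 : ∀ j : Nat,
      (Array.replicate (x + 1).toNat (false : Bool))[j]?.getD false = false := by
    intro j
    rcases h : (Array.replicate (x + 1).toNat (false : Bool))[j]? with _ | b
    · rfl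
    · have := Array.getElem?_replicate (n := (x + 1).toNat) (v := (false : Bool)) (i := j)
      rw [h] at this
      split at this
      · cases this; rfl
      · cases this
  induction k with
  | zero =>
    have hnil : PySem.List.pyRange 8 (8 + ((0 : Nat) : Int)) 1 = [] :=
      PySem.List.pyRange_one_eq_nil (by omega)
    rw [hnil]
    simp only [List.foldl_nil]
    refine ⟨by simp [Array.size_setIfInBounds], ?_⟩
    intro j hj8
    rw [pvGetD_set _ _ _ _ (by simp [Array.size_setIfInBounds]; omega),
        pvGetD_set _ _ _ _ (by simp [Array.size_setIfInBounds]; omega),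
        pvGetD_set _ _ _ _ (by rw [hbsize]; omega)]
    have hj8' : j < 8 := by omega
    interval_cases j <;> simp [hbase2, pvRep]
  | succ k ih =>
    have hk' : 8 + (k : Int) ≤ x + 1 := by push_cast at hk ⊢; omega
    obtain ⟨ihsize, ihval⟩ := ih hk'
    have hsplit : PySem.List.pyRange 8 (8 + ((k + 1 : Nat) : Int)) 1
        = PySem.List.pyRange 8 (8 + (k : Int)) 1 ++ [8 + (k : Int)] := by
      have : (8 : Int) + ((k + 1 : Nat) : Int) = (8 + (k : Int)) + 1 := by push_cast; omega
      rw [this, PySem.List.pyRange_one_succ_right (by omega)]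
    rw [hsplit, List.foldl_append]
    simp only [List.foldl_cons, List.foldl_nil]
    set prev := (PySem.List.pyRange 8 (8 + (k : Int)) 1).foldl
      (fun d i => d.setIfInBounds i.toNat
        (d.getD (i - 3).toNat false || d.getD (i - 7).toNat false))
      ((((((PySem.List.pyRange 0 (x + 1) 1).map (fun _ => false)).toArray).setIfInBounds 3
        true).setIfInBounds 6 true).setIfInBounds 7 true) with hprev
    have hidx : ((8 : Int) + (k : Int)).toNat = 8 + k := by omega
    have h3 : ((8 : Int) + (k : Int) - 3).toNat = k + 5 := by omega
    have h7 : ((8 : Int) + (k : Int) - 7).toNat = k + 1 := by omega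
    rw [hidx, h3, h7]
    have hb : 8 + k < prev.size := by rw [ihsize]; omega
    refine ⟨by simp [Array.size_setIfInBounds, ihsize], ?_⟩
    intro j hjlt
    rw [pvGetD_set _ _ _ _ hb]
    by_cases hje : j = 8 + k
    · rw [if_pos hje]
      have hv3 := ihval (k + 5) (by push_cast; omega)
      have hv7 := ihval (k + 1) (by push_cast; omega)
      have e3 : (((k + 5 : Nat) : Int)) = 8 + (k : Int) - 3 := by push_cast; omega
      have e7 : (((k + 1 : Nat) : Int)) = 8 + (k : Int) - 7 := by push_cast; omega
      rw [e3] at hv3; rw [e7] at hv7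
      rw [hv3, hv7, pvRep_rec _ (by omega), hje]
      exact congrArg pvRep (by omega)
    · rw [if_neg hje]
      exact ihval j (by push_cast at hjlt ⊢; omega)

-- ===== VERDICT (by name: the statement is the Claim_ definition above) =====
theorem isBuild_spec : Claim_unchanged_isBuild := by
  intro x _ hnd
  unfold D_isBuild at hnd
  show isBuild x = isBuild_alt x
  unfold isBuild isBuild_alt
  by_cases h1 : x < 3 ∨ (x > 3 ∧ x < 7)
  · rw [if_pos h1, if_neg (by omega)]
  · rw [if_neg h1]
    by_cases h2 : x = 3 ∨ x = 6
    · have h3 : x = 3 := by omega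
      rw [if_pos h2, if_pos (by omega)]
    · rw [if_neg h2]
      have hx : 7 ≤ x := by omega
      have hk8 : 8 + (((x - 7).toNat : Nat) : Int) = x + 1 := by omega
      obtain ⟨_, hval⟩ := pv_inv x hx (x - 7).toNat (by omega)
      rw [hk8] at hval
      have hvx := hval x.toNat (by omega)
      have ex : ((x.toNat : Nat) : Int) = x := by omega
      rw [ex] at hvx
      simp only [hvx]
      by_cases hr : 3 ≤ x ∧ x ≠ 4 ∧ x ≠ 5 ∧ x ≠ 8 ∧ x ≠ 11
      · have ht : pvRep x = true := decide_eq_true hr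
        simp [ht, hr]
      · have hf : pvRep x = false := decide_eq_false hr
        simp [hf, hr]
theorem isBuild_changed : Claim_changed_isBuild := by unfold Claim_changed_isBuild; decide
theorem isBuild_tight : Claim_exact_isBuild := by
  intro x _ hd; unfold D_isBuild at hd; subst hd; decide
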